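-- pv_equiv track=rewrite | github.com/yangnianzu0515/MFDesign | src/boltz/data/evaluation/align.py | find_x_intervals_as_ranges
-- ===== SOURCE A (Python) =====
-- def find_x_intervals_as_ranges(sequence):
--     """
--     Finds all intervals of consecutive 'X' in the sequence and stores them as range objects.
--     The indices in the range objects are 1-based.
--
--     Args:
--         sequence (str): The input sequence.
--
--     Returns:
--         list: A list of range objects, where each range represents a region containing consecutive 'X'.
--     """
--     intervals = []
--     start = None
--
--     for i, char in enumerate(sequence):
--         if char == 'X':
--             if start is None:  # Start of a new 'X' region
--                 start = i + 1  # Convert to 1-based index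
--         else:
--             if start is not None:  # End of an 'X' region
--                 intervals.append(list(range(start, i + 1)))  # Convert to 1-based range
--                 start = None
--
--     # Handle the case where the sequence ends with 'X'
--     if start is not None:
--         intervals.append(list(range(start, len(sequence) + 1)))
--
--     num_X = sequence.count('X')
--     len_x = sum(len(l) for l in intervals)
--     assert num_X == len_x, 'X indices has problem'
--
--     return intervals
-- ===== SOURCE B (Python) =====
-- def find_x_intervals_as_ranges(sequence):
--     """
--     Finds all intervals of consecutive 'X' in the sequence, as 1-based index lists.
--     Two-phase: first collect all 1-based 'X' positions, then segment that index
--     list into maximal runs of consecutive integers.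
--     """
--     idxs = [i + 1 for i, char in enumerate(sequence) if char == 'X']
--     intervals = []
--     for i in idxs:
--         if intervals and intervals[-1][-1] == i - 1:
--             intervals[-1].append(i)
--         else:
--             intervals.append([i])
--     return intervals
-- ===== Notes on version B (the rewrite author's own statement) =====
-- stated objective: alternative
-- what changed: B replaces A's single-scan open/close run tracking (start sentinel plus range construction and a count/sum assert) with a two-phase scheme: collect the 1-based positions of the target character with a comprehension, then segment that index list into maximal consecutive runs.
import Mathlib
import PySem

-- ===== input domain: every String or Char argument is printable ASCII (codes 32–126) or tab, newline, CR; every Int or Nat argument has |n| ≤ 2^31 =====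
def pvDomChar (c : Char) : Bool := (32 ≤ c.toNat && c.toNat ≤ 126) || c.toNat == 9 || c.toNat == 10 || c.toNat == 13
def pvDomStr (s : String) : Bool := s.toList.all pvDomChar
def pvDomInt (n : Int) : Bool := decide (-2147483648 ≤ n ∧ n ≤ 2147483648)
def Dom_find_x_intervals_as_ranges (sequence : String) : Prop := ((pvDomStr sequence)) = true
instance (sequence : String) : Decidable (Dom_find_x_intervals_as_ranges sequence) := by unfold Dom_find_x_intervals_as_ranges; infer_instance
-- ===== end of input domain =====

-- B replaces A's single-scan open/close run tracking with a two-phase scheme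
-- (collect 1-based 'X' positions, then segment into consecutive runs); return values proved equal.


-- ===== PORT A =====
-- the for-loop of A: state (intervals, start), i is the 0-based index of the head char
def pvLoopA : List Char → Int → List (List Int) × Option Int → List (List Int) × Option Int
  | [], _, st => st
  | c :: rest, i, (intervals, start) =>
    if c = 'X' then
      match start with
      | none => pvLoopA rest (i + 1) (intervals, some (i + 1))
      | some s => pvLoopA rest (i + 1) (intervals, some s)
    else
      match start with
      | none => pvLoopA rest (i + 1) (intervals, none)
      | some s => pvLoopA rest (i + 1) (intervals ++ [PySem.List.pyRange s (i + 1) 1], none)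

-- the assert 'num_X == len_x' always succeeds, so it is a no-op on the result
def find_x_intervals_as_ranges (sequence : String) : List (List Int) :=
  match pvLoopA sequence.toList 0 ([], none) with
  | (intervals, none) => intervals
  | (intervals, some s) => intervals ++ [PySem.List.pyRange s ((sequence.toList.length : Int) + 1) 1]

-- ===== PORT B =====
-- [i + 1 for i, char in enumerate(sequence) if char == 'X'], i = 0-based index of head char
def pvXIdxs : List Char → Int → List Int
  | [], _ => []
  | c :: rest, i => if c = 'X' then (i + 1) :: pvXIdxs rest (i + 1) else pvXIdxs rest (i + 1)

-- the for-loop of B: append i to the last group if it continues it, else start a new group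
def pvGroup : List Int → List (List Int) → List (List Int)
  | [], intervals => intervals
  | i :: rest, intervals =>
    match intervals.getLast? with
    | some g =>
        if g.getLast? = some (i - 1) then pvGroup rest (intervals.dropLast ++ [g ++ [i]])
        else pvGroup rest (intervals ++ [[i]])
    | none => pvGroup rest (intervals ++ [[i]])

def find_x_intervals_as_ranges_alt (sequence : String) : List (List Int) :=
  pvGroup (pvXIdxs sequence.toList 0) []

-- ===== PRECONDITION & SPEC =====
def Spec_find_x_intervals_as_ranges (sequence : String) (out : List (List Int)) : Prop := out = find_x_intervals_as_ranges_alt sequence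
instance (sequence : String) (out : List (List Int)) : Decidable (Spec_find_x_intervals_as_ranges sequence out) := by unfold Spec_find_x_intervals_as_ranges; infer_instance

-- ===== CLAIM (what is proved, stated in full; the proofs are below) =====
def Claim_equal_find_x_intervals_as_ranges : Prop := ∀ (sequence : String), Dom_find_x_intervals_as_ranges sequence → Spec_find_x_intervals_as_ranges sequence (find_x_intervals_as_ranges sequence)

-- ===== LEMMAS AND PROOFS =====

-- result of A's loop started at head index i, with the trailing close-out applied
def pvAClose (i : Int) : List (List Int) × Option Int → List (List Int)
  | (intervals, none) => intervals
  | (intervals, some s) => intervals ++ [PySem.List.pyRange s (i + 1) 1]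

-- when A's state is 'start = None' at head index i, any previously closed run ended before i
def pvOkNone (acc : List (List Int)) (i : Int) : Prop :=
  ∀ g t, acc.getLast? = some g → g.getLast? = some t → t < i

theorem pvRange_getLast (s i : Int) (h : s ≤ i) :
    (PySem.List.pyRange s (i + 1) 1).getLast? = some i := by
  rw [PySem.List.pyRange_one_succ_right h, List.getLast?_concat]

theorem pvInvariant : ∀ (cs : List Char) (i : Int) (acc : List (List Int)),
    (pvOkNone acc i → pvAClose (i + cs.length) (pvLoopA cs i (acc, none)) = pvGroup (pvXIdxs cs i) acc)
    ∧ (∀ s, s ≤ i → pvAClose (i + cs.length) (pvLoopA cs i (acc, some s)) =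
        pvGroup (pvXIdxs cs i) (acc ++ [PySem.List.pyRange s (i + 1) 1])) := by
  intro cs
  induction cs with
  | nil =>
    intro i acc
    simp [pvLoopA, pvXIdxs, pvGroup, pvAClose]
  | cons c rest ih =>
    intro i acc
    constructor
    · intro hok
      by_cases hc : c = 'X'
      · -- start a new run at 1-based index i+1
        simp only [pvLoopA, pvXIdxs, if_pos hc]
        have key : pvGroup ((i + 1) :: pvXIdxs rest (i + 1)) acc
            = pvGroup (pvXIdxs rest (i + 1)) (acc ++ [[i + 1]]) := by
          cases hacc : acc.getLast? with
          | none => simp [pvGroup, hacc]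
          | some g =>
            cases hg : g.getLast? with
            | none => simp [pvGroup, hacc, hg]
            | some t =>
              have ht : t < i := hok g t hacc hg
              have hne : ¬ (g.getLast? = some i) := by
                rw [hg]; simp only [Option.some.injEq]; omega
              simp [pvGroup, hacc, hne]
        rw [key]
        have := (ih (i + 1) acc).2 (i + 1) le_rfl
        rw [PySem.List.pyRange_one_singleton] at this
        rw [show i + ((c :: rest).length : Int) = (i + 1) + ↑rest.length by push_cast [List.length_cons]; ring]
        exact this
      · simp only [pvLoopA, pvXIdxs, if_neg hc]
        rw [show i + ((c :: rest).length : Int) = (i + 1) + ↑rest.length by push_cast [List.length_cons]; ring]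
        exact (ih (i + 1) acc).1 (fun g t hacc hg => lt_trans (hok g t hacc hg) (by omega))
    · intro s hs
      by_cases hc : c = 'X'
      · -- extend the open run to 1-based index i+1
        simp only [pvLoopA, pvXIdxs, if_pos hc]
        have key : pvGroup ((i + 1) :: pvXIdxs rest (i + 1)) (acc ++ [PySem.List.pyRange s (i + 1) 1])
            = pvGroup (pvXIdxs rest (i + 1)) (acc ++ [PySem.List.pyRange s (i + 1 + 1) 1]) := by
          have hlast := pvRange_getLast s i hs
          have harith : i + 1 - 1 = i := by omega
          simp only [pvGroup, List.getLast?_concat, hlast, harith,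
            List.dropLast_concat]
          rw [PySem.List.pyRange_one_succ_right (show s ≤ i + 1 by omega)]
          simp
        rw [key]
        rw [show i + ((c :: rest).length : Int) = (i + 1) + ↑rest.length by push_cast [List.length_cons]; ring]
        exact (ih (i + 1) (acc)).2 s (by omega)
      · -- close the run
        simp only [pvLoopA, pvXIdxs, if_neg hc]
        rw [show i + ((c :: rest).length : Int) = (i + 1) + ↑rest.length by push_cast [List.length_cons]; ring]
        refine (ih (i + 1) (acc ++ [PySem.List.pyRange s (i + 1) 1])).1 ?_
        intro g t hacc hg
        rw [List.getLast?_concat] at hacc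
        cases hacc
        rw [pvRange_getLast s i hs] at hg
        cases hg
        omega

-- ===== VERDICT (by name: the statement is the Claim_ definition above) =====
theorem find_x_intervals_as_ranges_spec : Claim_equal_find_x_intervals_as_ranges := by
  intro sequence _
  unfold Spec_find_x_intervals_as_ranges find_x_intervals_as_ranges find_x_intervals_as_ranges_alt
  have h := (pvInvariant sequence.toList 0 []).1 (by intro g t h _; simp at h)
  simp only [zero_add] at h
  cases hA : pvLoopA sequence.toList 0 ([], none) with
  | mk intervals start =>
    rw [hA] at h
    cases start with
    | none => simpa [pvAClose] using h
    | some s => simpa [pvAClose] using h
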